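-- pv_equiv track=rewrite | github.com/wmullen188/probable-spoon | lesson5/2252_MullenW_Lesson05_InLab.py | sequence_builder
-- ===== SOURCE A (Python) =====
-- def sequence_builder(numbers):
--     sequence_str = ""
--     for number in numbers:
--         if not numbers.index(number) == (len(numbers) - 1):
--             sequence_str += f"{number}-"
--         else:
--             sequence_str += f"{number}"
--     return sequence_str
-- ===== SOURCE B (Python) =====
-- def sequence_builder(numbers):
--     return "-".join(f"{n}" for n in numbers)
-- ===== Notes on version B (the rewrite author's own statement) =====
-- stated objective: idiomatic
-- what changed: Replaces the per-element loop that rescans the list with numbers.index on every iteration by a single '-'.join over the formatted elements.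
-- intended difference: When the last element's value also occurs earlier in the list, A's numbers.index check never fires and A returns the joined string with a spurious trailing '-' (e.g. [1,1] -> '1-1-'), while B returns the dash-joined string without a trailing dash ('1-1'), which is the intended dash-separated sequence. — e.g. on sequence_builder([1, 1]): A returns "1-1-", B returns "1-1"
import Mathlib
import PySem

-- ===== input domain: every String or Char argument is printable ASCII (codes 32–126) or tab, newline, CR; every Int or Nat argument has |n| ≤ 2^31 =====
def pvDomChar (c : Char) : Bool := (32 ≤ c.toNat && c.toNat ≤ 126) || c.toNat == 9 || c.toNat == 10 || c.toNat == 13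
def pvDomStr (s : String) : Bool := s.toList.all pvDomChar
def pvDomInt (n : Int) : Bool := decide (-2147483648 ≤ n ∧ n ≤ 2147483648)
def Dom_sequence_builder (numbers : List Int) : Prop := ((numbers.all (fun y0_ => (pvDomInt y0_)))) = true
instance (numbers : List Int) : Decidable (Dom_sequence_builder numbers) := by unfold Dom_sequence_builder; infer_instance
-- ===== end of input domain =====

-- B replaces A's per-element loop (which rescans the list with numbers.index each
-- iteration) by a single '-'.join over the formatted elements; on lists whose last
-- value also occurs earlier, A returns a spurious trailing '-' and B does not (see D_).


-- ===== PORT A =====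
-- Literal port of A's loop: for each element, Python rescans the list with
-- numbers.index(number) and compares with len(numbers)-1.  The loop only runs on a
-- nonempty list, so the Nat subtraction numbers.length - 1 matches Python's len-1 there.
def sequence_builder (numbers : List Int) : String :=
  numbers.foldl
    (fun sequence_str number =>
      if ¬ (PySem.List.index? numbers number = some (numbers.length - 1)) then
        sequence_str ++ PySem.Int.toStr number ++ "-"
      else
        sequence_str ++ PySem.Int.toStr number)
    ""

-- ===== PORT B =====
def sequence_builder_alt (numbers : List Int) : String :=
  PySem.Str.join "-" (numbers.map (fun n => PySem.Int.toStr n))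

-- ===== PRECONDITION & SPEC =====
-- When the last element's value also occurs earlier in the list, A's index check never
-- fires and A returns the joined string with a spurious trailing '-', while B returns
-- the dash-joined string without it, which is the intended dash-separated sequence.
def D_sequence_builder (numbers : List Int) : Prop :=
  ∃ l ∈ numbers.dropLast, numbers.getLast? = some l
instance (numbers : List Int) : Decidable (D_sequence_builder numbers) := by
  unfold D_sequence_builder; infer_instance

def Spec_sequence_builder (numbers : List Int) (out : String) : Prop :=
  ¬ D_sequence_builder numbers → out = sequence_builder_alt numbers
instance (numbers : List Int) (out : String) : Decidable (Spec_sequence_builder numbers out) := by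
  unfold Spec_sequence_builder; infer_instance

def pvDiffWitness_sequence_builder : List Int := [1, 1]
def pvDiffWitnessOut_sequence_builder : String × String := ("1-1-", "1-1")

-- ===== CLAIM (what is proved, stated in full; the proofs are below) =====
def Claim_unchanged_sequence_builder : Prop := ∀ (numbers : List Int), Dom_sequence_builder numbers → Spec_sequence_builder numbers (sequence_builder numbers)
def Claim_changed_sequence_builder : Prop := Dom_sequence_builder (pvDiffWitness_sequence_builder) ∧ D_sequence_builder (pvDiffWitness_sequence_builder) ∧ sequence_builder (pvDiffWitness_sequence_builder) = pvDiffWitnessOut_sequence_builder.1 ∧ sequence_builder_alt (pvDiffWitness_sequence_builder) = pvDiffWitnessOut_sequence_builder.2 ∧ pvDiffWitnessOut_sequence_builder.1 ≠ pvDiffWitnessOut_sequence_builder.2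
def Claim_exact_sequence_builder : Prop := ∀ (numbers : List Int), Dom_sequence_builder numbers → D_sequence_builder numbers → sequence_builder numbers ≠ sequence_builder_alt numbers

-- ===== LEMMAS AND PROOFS =====

-- A's loop body, with the whole (fixed) list N as the list being indexed into.
def pvBody (N : List Int) (sequence_str : String) (number : Int) : String :=
  if ¬ (PySem.List.index? N number = some (N.length - 1)) then
    sequence_str ++ PySem.Int.toStr number ++ "-"
  else
    sequence_str ++ PySem.Int.toStr number

theorem pvBody_eq (N : List Int) :
    sequence_builder N = N.foldl (pvBody N) "" := rfl

-- An element of the initial segment never has first index len-1.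
theorem pvIndex_init_ne (init : List Int) (l x : Int) (hx : x ∈ init) :
    PySem.List.index? (init ++ [l]) x ≠ some ((init ++ [l]).length - 1) := by
  rw [PySem.List.index?_append_of_mem [l] hx]
  intro h
  have hlen : (init ++ [l]).length - 1 = init.length := by simp
  rw [hlen] at h
  rcases (PySem.List.index?_eq_some_iff init x init.length).1 h with ⟨pre, suf, hinit, hlen2, -⟩
  have := congrArg List.length hinit
  simp at this
  omega

-- If every processed element fails A's index check, the fold appends "<n>-" per element.
theorem pvFold_all_dashed (N : List Int) (ys : List Int) (s : String)
    (h : ∀ x ∈ ys, PySem.List.index? N x ≠ some (N.length - 1)) :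
    (ys.foldl (pvBody N) s).toList
      = s.toList ++ (ys.map (fun x => (PySem.Int.toStr x).toList ++ ['-'])).flatten := by
  induction ys generalizing s with
  | nil => simp
  | cons x rest ih =>
    have hx : pvBody N s x = s ++ PySem.Int.toStr x ++ "-" := by
      unfold pvBody
      rw [if_pos (h x (by simp))]
    simp only [List.foldl_cons]
    rw [ih (pvBody N s x) (fun y hy => h y (by simp [hy])), hx]
    simp

-- '-'.join of the pieces for init ++ [l] = the dashed pieces of init, then the last piece.
theorem pvJoin_dashed (init : List Int) (l : Int) :
    PySem.Chars.join ['-'] ((init ++ [l]).map (fun x => (PySem.Int.toStr x).toList))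
      = (init.map (fun x => (PySem.Int.toStr x).toList ++ ['-'])).flatten
          ++ (PySem.Int.toStr l).toList := by
  induction init with
  | nil => simp [PySem.Chars.join_singleton]
  | cons x rest ih =>
    have hmap : ((x :: rest ++ [l]).map (fun x => (PySem.Int.toStr x).toList))
        = (PySem.Int.toStr x).toList
          :: ((rest ++ [l]).map (fun x => (PySem.Int.toStr x).toList)) := by simp
    rcases hr : (rest ++ [l]).map (fun x => (PySem.Int.toStr x).toList) with _ | ⟨q, qs⟩
    · simp at hr
    · rw [hmap, hr, PySem.Chars.join_cons_cons, ← hr, ih]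
      simp

theorem pvAlt_toList (numbers : List Int) :
    (sequence_builder_alt numbers).toList
      = PySem.Chars.join ['-'] (numbers.map (fun x => (PySem.Int.toStr x).toList)) := by
  simp only [sequence_builder_alt, PySem.Str.toList_join, List.map_map]
  rfl

-- The core computation of A's fold on a list split as init ++ [l].
theorem pvA_toList (init : List Int) (l : Int) :
    (sequence_builder (init ++ [l])).toList
      = (init.map (fun x => (PySem.Int.toStr x).toList ++ ['-'])).flatten
          ++ (if PySem.List.index? (init ++ [l]) l = some ((init ++ [l]).length - 1)
              then (PySem.Int.toStr l).toList
              else (PySem.Int.toStr l).toList ++ ['-']) := by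
  rw [pvBody_eq, List.foldl_append]
  simp only [List.foldl_cons, List.foldl_nil]
  have hinit : ∀ x ∈ init,
      PySem.List.index? (init ++ [l]) x ≠ some ((init ++ [l]).length - 1) :=
    fun x hx => pvIndex_init_ne init l x hx
  have hfold := pvFold_all_dashed (init ++ [l]) init "" hinit
  by_cases hc : PySem.List.index? (init ++ [l]) l = some ((init ++ [l]).length - 1)
  · rw [if_pos hc]
    have hb : pvBody (init ++ [l]) (List.foldl (pvBody (init ++ [l])) "" init) l
        = List.foldl (pvBody (init ++ [l])) "" init ++ PySem.Int.toStr l := by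
      unfold pvBody; rw [if_neg (not_not_intro hc)]
    rw [hb]
    simp [hfold]
  · rw [if_neg hc]
    have hb : pvBody (init ++ [l]) (List.foldl (pvBody (init ++ [l])) "" init) l
        = List.foldl (pvBody (init ++ [l])) "" init ++ PySem.Int.toStr l ++ "-" := by
      unfold pvBody; rw [if_pos hc]
    rw [hb]
    simp [hfold]

theorem pvMain (numbers : List Int) (h : ¬ D_sequence_builder numbers) :
    sequence_builder numbers = sequence_builder_alt numbers := by
  rcases List.eq_nil_or_concat numbers with hnil | ⟨init, l, hc⟩
  · subst hnil; rfl
  · rw [List.concat_eq_append] at hc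
    subst hc
    have hnotmem : l ∉ init := by
      intro hmem
      exact h ⟨l, by simp [hmem], by simp⟩
    have hidx : PySem.List.index? (init ++ [l]) l = some ((init ++ [l]).length - 1) := by
      rw [PySem.List.index?_append_singleton_self init l hnotmem]
      simp
    apply String.ext
    rw [pvA_toList, pvAlt_toList, pvJoin_dashed, if_pos hidx]

theorem pvTight (numbers : List Int) (hd : D_sequence_builder numbers) :
    sequence_builder numbers ≠ sequence_builder_alt numbers := by
  rcases List.eq_nil_or_concat numbers with hnil | ⟨init, l, hc⟩
  · subst hnil; rcases hd with ⟨x, hx, -⟩; simp at hx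
  · rw [List.concat_eq_append] at hc
    subst hc
    rcases hd with ⟨x, hx, hlast⟩
    have hxl : x = l := by simpa using hlast.symm
    have hmem : l ∈ init := by
      have hxi : x ∈ init := by simpa using hx
      rwa [hxl] at hxi
    have hidx : PySem.List.index? (init ++ [l]) l ≠ some ((init ++ [l]).length - 1) :=
      pvIndex_init_ne init l l hmem
    intro heq
    have h1 := congrArg String.toList heq
    rw [pvA_toList, pvAlt_toList, pvJoin_dashed, if_neg hidx] at h1
    have h2 := congrArg List.length h1
    simp at h2

-- ===== VERDICT (by name: the statement is the Claim_ definition above) =====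
theorem sequence_builder_spec : Claim_unchanged_sequence_builder := by
  intro numbers _ hD
  exact pvMain numbers hD

theorem sequence_builder_changed : Claim_changed_sequence_builder := by
  unfold Claim_changed_sequence_builder; decide

theorem sequence_builder_tight : Claim_exact_sequence_builder := by
  intro numbers _ hd
  exact pvTight numbers hd
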